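-- pv_equiv track=rewrite | github.com/dimerick/redes-afectivas | backend/views.py | fix_lat
-- ===== SOURCE A (Python) =====
-- def fix_lat(lat):
-- 	lat = lat.strip()
-- 	lat = lat.replace(".", "")
-- 	lat = lat.replace(",", "")
-- 	cadena = ""
-- 	i = 0
-- 	for l in lat:
-- 		if i == 1:
-- 			cadena += "."
-- 		cadena += l
-- 		i += 1
-- 	return cadena
-- ===== SOURCE B (Python) =====
-- def fix_lat(lat):
-- 	cleaned = lat.strip().replace(".", "").replace(",", "")
-- 	if len(cleaned) < 2:
-- 		return cleaned
-- 	return cleaned[:1] + "." + cleaned[1:]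
-- ===== Notes on version B (the rewrite author's own statement) =====
-- stated objective: simpler
-- what changed: Replaces the char-by-char accumulation loop with an index counter by a guarded closed-form slice expression that inserts the decimal point after the first character.
import Mathlib
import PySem

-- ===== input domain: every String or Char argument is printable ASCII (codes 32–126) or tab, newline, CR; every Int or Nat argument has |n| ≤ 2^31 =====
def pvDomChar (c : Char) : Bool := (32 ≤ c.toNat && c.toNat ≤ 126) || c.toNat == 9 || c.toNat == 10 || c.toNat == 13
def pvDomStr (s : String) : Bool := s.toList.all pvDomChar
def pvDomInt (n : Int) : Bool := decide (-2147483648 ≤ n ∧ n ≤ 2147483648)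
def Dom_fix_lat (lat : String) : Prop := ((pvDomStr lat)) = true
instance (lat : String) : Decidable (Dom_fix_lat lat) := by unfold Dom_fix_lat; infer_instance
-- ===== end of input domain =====

-- B replaces A's char-by-char accumulation loop by a guarded closed-form slice; objective: simpler.

-- ===== PORT A =====
def fix_lat (lat : String) : String :=
  let lat1 := PySem.Str.strip lat
  let lat2 := PySem.Str.replace lat1 "." ""
  let lat3 := PySem.Str.replace lat2 "," ""
  let st := lat3.toList.foldl
      (fun (st : List Char × Nat) l =>
        ((if st.2 = 1 then st.1 ++ ['.'] else st.1) ++ [l], st.2 + 1))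
      ([], 0)
  String.ofList st.1

-- ===== PORT B =====
def fix_lat_alt (lat : String) : String :=
  let cl := PySem.Str.replace (PySem.Str.replace (PySem.Str.strip lat) "." "") "," ""
  if PySem.Str.len cl < 2 then cl
  else String.ofList (PySem.Chars.slice cl.toList none (some 1) ++ ['.'] ++
        PySem.Chars.slice cl.toList (some 1) none)

-- ===== PRECONDITION & SPEC =====
def Spec_fix_lat (lat : String) (out : String) : Prop := out = fix_lat_alt lat
instance (lat : String) (out : String) : Decidable (Spec_fix_lat lat out) := by unfold Spec_fix_lat; infer_instance

-- ===== CLAIM (what is proved, stated in full; the proofs are below) =====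
def Claim_equal_fix_lat : Prop := ∀ (lat : String), Dom_fix_lat lat → Spec_fix_lat lat (fix_lat lat)

-- ===== LEMMAS AND PROOFS =====
-- once the counter is ≥ 2, the loop just appends the remaining characters
theorem fixlat_loop_tail (cs : List Char) (acc : List Char) (i : Nat) (hi : 2 ≤ i) :
    (cs.foldl
      (fun (st : List Char × Nat) l =>
        ((if st.2 = 1 then st.1 ++ ['.'] else st.1) ++ [l], st.2 + 1))
      (acc, i)).1 = acc ++ cs := by
  induction cs generalizing acc i with
  | nil => simp
  | cons c cs ih =>
    have : ¬ i = 1 := by omega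
    simp only [List.foldl_cons, this, if_false]
    rw [ih (acc ++ [c]) (i + 1) (by omega)]
    simp

-- ===== VERDICT (by name: the statement is the Claim_ definition above) =====
theorem fix_lat_spec : Claim_equal_fix_lat := by
  intro lat _
  unfold Spec_fix_lat fix_lat fix_lat_alt
  simp only [PySem.Chars.slice_eq_listSlice]
  set cl := PySem.Str.replace (PySem.Str.replace (PySem.Str.strip lat) "." "") "," "" with hcl
  rw [show (1:Int) = ((1:Nat):Int) from rfl, PySem.List.slice_to_natCast, PySem.List.slice_from_natCast]
  match h : cl.toList with
  | [] =>
    have hlen : PySem.Str.len cl < 2 := by simp [PySem.Str.len_eq, h]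
    have hcl' : String.ofList cl.toList = cl := by simp [String.ofList]
    rw [if_pos hlen]
    simp only [List.foldl_nil]
    rw [h] at hcl'
    exact hcl'
  | [c] =>
    have hlen : PySem.Str.len cl < 2 := by simp [PySem.Str.len_eq, h]
    have hcl' : String.ofList cl.toList = cl := by simp [String.ofList]
    rw [if_pos hlen]
    simp only [List.foldl_cons, List.foldl_nil]
    rw [h] at hcl'
    simpa using hcl'
  | c :: d :: rest =>
    have hlen : ¬ PySem.Str.len cl < 2 := by simp [PySem.Str.len_eq, h]
    simp only [if_neg hlen, List.foldl_cons]
    norm_num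
    rw [fixlat_loop_tail rest [c, '.', d] 2 (by omega)]
    simp
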